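-- pv_equiv track=rewrite | github.com/manas-17045/LeetcodeSolutions | Leetcode 2001-2100/2019/2019_2.py | scoreOfStudents
-- ===== SOURCE A (Python) =====
-- from functools import lru_cache
--
-- def scoreOfStudents(s: str, answers: list[int]) -> int:
--     """
--     Calculates the score of students based on their answers to an arithmetic expression.
--
--     :param s: The arithmetic expression as a string.
--     :param answers: A list of integer answers provided by students.
--     :return: The total score of the students.
--     """
--     toks = []
--     for ch in s:
--         if ch.isdigit():
--             toks.append(int(ch))
--         else:
--             toks.append(ch)
--
--     # First pass: Collapse all multiplications
--     stack = []
--     i = 0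
--     while i < len(toks):
--         if toks[i] == '*':
--             a = stack.pop()
--             b = toks[i + 1]
--             stack.append(a * b)
--             i += 2
--         else:
--             stack.append(toks[i])
--             i += 1
--     # Now stack is a sequence of ints and '+' only
--     true = 0
--     i = 0
--     while i < len(stack):
--         if stack[i] == '+':
--             i += 1
--         else:
--             true += stack[i]
--             i += 1
--
--     # Build all possible results by any parenthesization
--     n = len(s)
--
--     @lru_cache(None)
--     def compute(lo: int, hi: int) -> set:
--         # Base: single digit
--         if lo == hi:
--             return {int(s[lo])}
--
--         res = set()
--         # Try every operator position k between lo,hi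
--         for k in range(lo + 1, hi, 2):
--             op = s[k]
--             left_vals = compute(lo, k - 1)
--             right_vals = compute(k + 1, hi)
--             if op == '+':
--                 for a in left_vals:
--                     for b in right_vals:
--                         v = a + b
--                         if v <= 1000:
--                             res.add(v)
--             else:  # op == '*'
--                 for a in left_vals:
--                     for b in right_vals:
--                         v = a * b
--                         if v <= 1000:
--                             res.add(v)
--         return res
--
--     all_vals = compute(0, n - 1)
--     # The “incorrect but achievable” bucket:
--     wrong = all_vals - {true}
--
--     # Score the student answers
--     score = 0
--     for ans in answers:
--         if ans == true:
--             score += 5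
--         elif ans in wrong:
--             score += 2
--         # else +0
--     return score
-- ===== SOURCE B (Python) =====
-- def scoreOfStudents(s: str, answers: list[int]) -> int:
--     # Bottom-up interval DP (dict keyed by digit-position intervals) instead of A's
--     # memoized recursion; true value by a one-pass sum-of-products scan.
--     nums = [int(s[i]) for i in range(0, len(s), 2)]
--     ops = [s[i] for i in range(1, len(s), 2)]
--
--     total, cur = 0, 0
--     for op, x in zip(['+'] + ops, nums):
--         if op == '+':
--             total += cur
--             cur = x
--         else:
--             cur *= x
--     true = total + cur
--
--     m = len(nums)
--     dp = {}
--     for i in range(m):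
--         dp[i, i] = {nums[i]}
--     for span in range(1, m):
--         for i in range(m - span):
--             j = i + span
--             res = set()
--             for k in range(i, j):
--                 if ops[k] == '+':
--                     for a in dp[i, k]:
--                         for b in dp[k + 1, j]:
--                             v = a + b
--                             if v <= 1000:
--                                 res.add(v)
--                 else:
--                     for a in dp[i, k]:
--                         for b in dp[k + 1, j]:
--                             v = a * b
--                             if v <= 1000:
--                                 res.add(v)
--             dp[i, j] = res
--
--     wrong = dp.get((0, m - 1), set()) - {true}
--     score = 0
--     for ans in answers:
--         if ans == true:
--             score += 5
--         elif ans in wrong: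
--             score += 2
--     return score
-- ===== Notes on version B (the rewrite author's own statement) =====
-- stated objective: alternative
-- what changed: Replaces A's lru_cache top-down recursion over character intervals with a bottom-up interval-DP dict over digit positions (spans increasing), and A's two-pass stack collapse of the true value with a one-pass sum-of-products scan.
-- outside the precondition, e.g. on scoreOfStudents('12', [3]): A returns 5, B returns 0; on scoreOfStudents('0*0+1+', [0]): A returns 0, B returns 2; on scoreOfStudents('++', [0]): A returns 5, B raises ValueError
import Mathlib
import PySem

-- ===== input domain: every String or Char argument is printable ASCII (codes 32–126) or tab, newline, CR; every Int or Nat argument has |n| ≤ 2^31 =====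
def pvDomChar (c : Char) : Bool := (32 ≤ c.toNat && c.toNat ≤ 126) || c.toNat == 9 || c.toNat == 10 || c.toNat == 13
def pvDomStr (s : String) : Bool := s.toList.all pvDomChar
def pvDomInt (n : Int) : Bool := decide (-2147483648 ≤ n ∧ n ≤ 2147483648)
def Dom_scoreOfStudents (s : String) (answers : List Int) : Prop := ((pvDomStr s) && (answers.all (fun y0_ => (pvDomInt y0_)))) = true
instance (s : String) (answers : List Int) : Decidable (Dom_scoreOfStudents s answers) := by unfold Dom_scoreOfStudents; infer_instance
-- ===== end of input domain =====

-- B replaces A's memoized top-down recursion over character intervals by a bottom-up interval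
-- DP table over digit positions, and A's two-pass stack collapse of the true value by a
-- one-pass sum-of-products scan; equal on well-formed expressions (Pre_).

-- ===== PORT A =====

-- Python toks is a list mixing ints and one-char strings; PvTok models that union.
inductive PvTok
  | I : Int → PvTok
  | C : Char → PvTok
deriving DecidableEq, Repr

-- int(c) for a single digit character (every place A applies it is guarded by isdigit / Pre_); exact there.
def pvDigitVal (c : Char) : Int := (c.toNat : Int) - 48

def pvTokVal : PvTok → Int
  | PvTok.I n => n
  | PvTok.C _ => 0   -- Python raises TypeError on a str here; unreachable under Pre_

def pvMulTok : PvTok → PvTok → PvTok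
  | PvTok.I a, PvTok.I b => PvTok.I (a * b)
  | _, _ => PvTok.I 0   -- Python str/int mix (raises or string-repeats); unreachable under Pre_

-- the first while loop; the Python stack grows at the tail, modelled head-first and reversed afterwards
def pvPass1 : List PvTok → List PvTok → List PvTok
  | stack, [] => stack
  | stack, t :: rest =>
    if t = PvTok.C '*' then
      pvPass1 (pvMulTok (stack.headD (PvTok.I 0)) (rest.headD (PvTok.I 0)) :: stack.tail) rest.tail
    else
      pvPass1 (t :: stack) rest
termination_by _ toks => toks.length
decreasing_by all_goals (simp only [List.length_tail, List.length_cons]; omega)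

-- lru_cache compute(lo, hi); fuel only makes the recursion total (Python's recursion terminates
-- on all reachable calls); called with fuel = len(s), amply enough under Pre_
def pvComputeA (cs : List Char) : Nat → Int → Int → List Int
  | 0, _, _ => []
  | fuel + 1, lo, hi =>
    if lo = hi then [pvDigitVal (PySem.List.pyGetD cs lo ' ')]
    else
      (PySem.List.pyRange (lo + 1) hi 2).foldl (fun res k =>
        let op := PySem.List.pyGetD cs k ' '
        let L := pvComputeA cs fuel lo (k - 1)
        let R := pvComputeA cs fuel (k + 1) hi
        if op = '+' then
          L.foldl (fun r a => R.foldl (fun r b => if a + b ≤ 1000 then PySem.Set.add r (a + b) else r) r) res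
        else
          L.foldl (fun r a => R.foldl (fun r b => if a * b ≤ 1000 then PySem.Set.add r (a * b) else r) r) res) []

def scoreOfStudents (s : String) (answers : List Int) : Int :=
  let toks := s.toList.map (fun ch => if ch.isDigit then PvTok.I (pvDigitVal ch) else PvTok.C ch)
  let stack := pvPass1 [] toks
  let trueVal := stack.reverse.foldl (fun acc t => if t = PvTok.C '+' then acc else acc + pvTokVal t) 0
  let cs := s.toList
  let allVals := pvComputeA cs cs.length 0 ((cs.length : Int) - 1)
  let wrong := PySem.Set.diff allVals [trueVal]
  answers.foldl (fun sc ans => if ans = trueVal then sc + 5 else if PySem.Set.contains wrong ans then sc + 2 else sc) 0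

-- ===== PORT B =====

-- the inner 'for k in range(i, j)' combine of Source B
def pvCombine (d : PySem.Dict (Int × Int) (List Int)) (ops : List Char) (i j : Int) : List Int :=
  (PySem.List.pyRange i j 1).foldl (fun res k =>
    if PySem.List.pyGetD ops k ' ' = '+' then
      (PySem.Dict.getD d (i, k) []).foldl (fun r a =>
        (PySem.Dict.getD d (k + 1, j) []).foldl (fun r b =>
          if a + b ≤ 1000 then PySem.Set.add r (a + b) else r) r) res
    else
      (PySem.Dict.getD d (i, k) []).foldl (fun r a =>
        (PySem.Dict.getD d (k + 1, j) []).foldl (fun r b =>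
          if a * b ≤ 1000 then PySem.Set.add r (a * b) else r) r) res) []

-- Source B's dp dict: cells dp[i, k] are only read after being written, and the final
-- dp.get((0, m-1), set()) is Dict.getD with default [].
def scoreOfStudents_alt (s : String) (answers : List Int) : Int :=
  let cs := s.toList
  let n := PySem.List.len cs
  let nums := (PySem.List.pyRange 0 n 2).map (fun i => pvDigitVal (PySem.List.pyGetD cs i ' '))
  let ops := (PySem.List.pyRange 1 n 2).map (fun i => PySem.List.pyGetD cs i ' ')
  let tc := (('+' :: ops).zip nums).foldl
      (fun (p : Int × Int) ox => if ox.1 = '+' then (p.1 + p.2, ox.2) else (p.1, p.2 * ox.2))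
      (0, 0)
  let trueVal := tc.1 + tc.2
  let m := PySem.List.len nums
  let dp0 := (PySem.List.pyRange 0 m 1).foldl
      (fun d i => d.insert (i, i) [PySem.List.pyGetD nums i 0]) (PySem.Dict.empty)
  let dp := (PySem.List.pyRange 1 m 1).foldl (fun d span =>
      (PySem.List.pyRange 0 (m - span) 1).foldl
        (fun d i => d.insert (i, i + span) (pvCombine d ops i (i + span))) d) dp0
  let wrong := PySem.Set.diff (PySem.Dict.getD dp (0, m - 1) []) [trueVal]
  answers.foldl (fun sc ans => if ans = trueVal then sc + 5 else if PySem.Set.contains wrong ans then sc + 2 else sc) 0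

-- ===== PRECONDITION & SPEC =====

-- well-formed arithmetic expression: digits at even positions, '+'/'*' at odd ones, odd length
def pvWFb : List Char → Bool
  | [] => false
  | [c] => c.isDigit
  | c :: o :: rest => c.isDigit && (o == '+' || o == '*') && pvWFb rest

-- Pre_ restricts to well-formed odd-length digit/operator expressions (the problem's guaranteed
-- input shape) plus the empty string; on other strings A variously raises
-- (TypeError/ValueError/IndexError) or returns accidental values of its two collapse passes
-- (empty achievable set on even-length input, digit characters read as operators), where B
-- raises or returns the straightforward values (examples cited in the claim).
def Pre_scoreOfStudents (s : String) (answers : List Int) : Prop :=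
  s.toList = [] ∨ pvWFb s.toList = true
instance (s : String) (answers : List Int) : Decidable (Pre_scoreOfStudents s answers) := by
  unfold Pre_scoreOfStudents; infer_instance

def pvWitness_scoreOfStudents : String × List Int := ("1+2*3", [7, 9, 0])

def Spec_scoreOfStudents (s : String) (answers : List Int) (out : Int) : Prop := out = scoreOfStudents_alt s answers
instance (s : String) (answers : List Int) (out : Int) : Decidable (Spec_scoreOfStudents s answers out) := by unfold Spec_scoreOfStudents; infer_instance

-- ===== CLAIM (what is proved, stated in full; the proofs are below) =====
def Claim_equal_scoreOfStudents : Prop := ∀ (s : String) (answers : List Int), Dom_scoreOfStudents s answers → Pre_scoreOfStudents s answers → Spec_scoreOfStudents s answers (scoreOfStudents s answers)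

-- ===== LEMMAS AND PROOFS =====

-- nums / ops of a (well-formed) expression, structurally
def pvNums : List Char → List Int
  | [] => []
  | [c] => [pvDigitVal c]
  | c :: _ :: rest => pvDigitVal c :: pvNums rest

def pvOps : List Char → List Char
  | _ :: o :: rest => o :: pvOps rest
  | _ => []

def pvG (t : PvTok) : Int := if t = PvTok.C '+' then 0 else pvTokVal t

def pvSumNP (l : List PvTok) : Int := (l.map pvG).sum

def pvSP (cur : Int) : List (Char × Int) → Int
  | [] => cur
  | (o, x) :: ps => if o = '+' then cur + pvSP x ps else pvSP (cur * x) ps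

def pvFlat : List (Char × Int) → List PvTok
  | [] => []
  | (o, x) :: ps => PvTok.C o :: PvTok.I x :: pvFlat ps

theorem pv_sumNP_nil : pvSumNP [] = 0 := rfl

theorem pv_sumNP_cons (t : PvTok) (l : List PvTok) : pvSumNP (t :: l) = pvG t + pvSumNP l := by
  simp [pvSumNP]

theorem pv_sumNP_reverse (l : List PvTok) : pvSumNP l.reverse = pvSumNP l := by
  simp [pvSumNP, List.map_reverse, List.sum_reverse]

theorem pv_sumNP_foldl (l : List PvTok) (a : Int) :
    l.foldl (fun acc t => if t = PvTok.C '+' then acc else acc + pvTokVal t) a = a + pvSumNP l := by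
  rw [PySem.List.foldl_congr_mem l _ (fun acc t => acc + pvG t) a
    (by intro acc x _; by_cases hx : x = PvTok.C '+' <;> simp [pvG, hx])]
  rw [PySem.List.foldl_add]
  rfl

theorem pv_pass1_flat (ps : List (Char × Int)) :
    ∀ stack (cur : Int), (∀ p ∈ ps, p.1 = '+' ∨ p.1 = '*') →
    pvSumNP (pvPass1 (PvTok.I cur :: stack) (pvFlat ps)) = pvSumNP stack + pvSP cur ps := by
  induction ps with
  | nil =>
    intro stack cur _
    simp [pvFlat, pvPass1, pv_sumNP_cons, pvSP, pvG, pvTokVal]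
    ring
  | cons p ps ih =>
    obtain ⟨o, x⟩ := p
    intro stack cur hmem
    have ho := hmem (o, x) (List.mem_cons_self ..)
    have hrest : ∀ p ∈ ps, p.1 = '+' ∨ p.1 = '*' := fun p hp => hmem p (List.mem_cons_of_mem _ hp)
    rcases ho with ho | ho <;> subst ho
    · -- '+' : push the op, push the next number
      show pvSumNP (pvPass1 _ (PvTok.C '+' :: PvTok.I x :: pvFlat ps)) = _
      rw [show pvPass1 (PvTok.I cur :: stack) (PvTok.C '+' :: PvTok.I x :: pvFlat ps)
            = pvPass1 (PvTok.I x :: PvTok.C '+' :: PvTok.I cur :: stack) (pvFlat ps) by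
        simp [pvPass1]]
      rw [ih _ x hrest]
      simp [pv_sumNP_cons, pvSP, pvG, pvTokVal]
      ring
    · -- '*' : collapse into the running product
      show pvSumNP (pvPass1 _ (PvTok.C '*' :: PvTok.I x :: pvFlat ps)) = _
      rw [show pvPass1 (PvTok.I cur :: stack) (PvTok.C '*' :: PvTok.I x :: pvFlat ps)
            = pvPass1 (PvTok.I (cur * x) :: stack) (pvFlat ps) by
        simp [pvPass1, pvMulTok]]
      rw [ih _ (cur * x) hrest]
      simp [pvSP]

theorem pv_bfold (ps : List (Char × Int)) : ∀ (total cur : Int),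
    (ps.foldl (fun (p : Int × Int) ox => if ox.1 = '+' then (p.1 + p.2, ox.2) else (p.1, p.2 * ox.2)) (total, cur)).1
    + (ps.foldl (fun (p : Int × Int) ox => if ox.1 = '+' then (p.1 + p.2, ox.2) else (p.1, p.2 * ox.2)) (total, cur)).2
    = total + pvSP cur ps := by
  induction ps with
  | nil => intro total cur; simp [pvSP]
  | cons p ps ih =>
    obtain ⟨o, x⟩ := p
    intro total cur
    by_cases ho : o = '+' <;> simp only [List.foldl_cons, ho, if_pos, if_neg, pvSP] <;>
      simp [ho, ih, pvSP] <;> ring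

theorem pv_nums_ne_nil (cs : List Char) (h : pvWFb cs = true) : pvNums cs ≠ [] := by
  induction cs using pvWFb.induct <;> simp_all [pvWFb, pvNums]

theorem pv_toks_shape (cs : List Char) (h : pvWFb cs = true) :
    cs.map (fun ch => if ch.isDigit then PvTok.I (pvDigitVal ch) else PvTok.C ch)
      = PvTok.I ((pvNums cs).headD 0) :: pvFlat ((pvOps cs).zip (pvNums cs).tail) := by
  induction cs using pvWFb.induct with
  | case1 => simp [pvWFb] at h
  | case2 c => simp [pvWFb] at h; simp [pvNums, pvOps, pvFlat, h]
  | case3 c o rest ih =>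
    simp only [pvWFb, Bool.and_eq_true, Bool.or_eq_true, beq_iff_eq] at h
    obtain ⟨⟨hc, ho⟩, hrest⟩ := h
    have hod : o.isDigit = false := by rcases ho with rfl | rfl <;> decide
    obtain ⟨a, tl, he⟩ := List.exists_cons_of_ne_nil (pv_nums_ne_nil rest hrest)
    have ih' := ih hrest
    rw [he] at ih'
    simp only [List.map_cons, hc, if_pos, hod, if_neg, Bool.false_eq_true, not_false_iff,
      pvNums, pvOps, he, ih']
    simp [pvFlat]
theorem pv_ops_mem (cs : List Char) (h : pvWFb cs = true) :
    ∀ o ∈ pvOps cs, o = '+' ∨ o = '*' := by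
  induction cs using pvWFb.induct with
  | case1 => simp [pvOps]
  | case2 c => simp [pvOps]
  | case3 c o rest ih =>
    simp only [pvWFb, Bool.and_eq_true, Bool.or_eq_true, beq_iff_eq] at h
    obtain ⟨⟨_, ho⟩, hrest⟩ := h
    intro o' ho'
    simp only [pvOps, List.mem_cons] at ho'
    rcases ho' with rfl | ho' 
    · exact ho
    · exact ih hrest o' ho'

theorem pv_len_eq (cs : List Char) (h : pvWFb cs = true) :
    cs.length = 2 * (pvNums cs).length - 1 ∧ (pvOps cs).length + 1 = (pvNums cs).length := by
  induction cs using pvWFb.induct with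
  | case1 => simp [pvWFb] at h
  | case2 c => simp [pvNums, pvOps]
  | case3 c o rest ih =>
    simp only [pvWFb, Bool.and_eq_true] at h
    have := ih h.2
    have hne := pv_nums_ne_nil rest h.2
    have : 1 ≤ (pvNums rest).length := by
      cases hn : pvNums rest with
      | nil => exact absurd hn hne
      | cons a tl => simp
    simp only [pvNums, pvOps, List.length_cons]
    omega

theorem pv_numsIdx (cs : List Char) (h : pvWFb cs = true) :
    ∀ t : Nat, t < (pvNums cs).length → pvDigitVal (cs.getD (2 * t) ' ') = (pvNums cs).getD t 0 := by
  induction cs using pvWFb.induct with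
  | case1 => simp [pvWFb] at h
  | case2 c =>
    intro t ht
    simp only [pvNums, List.length_cons, List.length_nil] at ht
    have : t = 0 := by omega
    subst this
    simp [pvNums]
  | case3 c o rest ih =>
    simp only [pvWFb, Bool.and_eq_true] at h
    intro t ht
    cases t with
    | zero => simp [pvNums]
    | succ t' =>
      have h2 : 2 * (t' + 1) = 2 * t' + 1 + 1 := by ring
      rw [h2]
      simp only [List.getD_cons_succ, pvNums]
      exact ih h.2 t' (by simpa [pvNums] using ht)

theorem pv_opsIdx (cs : List Char) (h : pvWFb cs = true) :
    ∀ t : Nat, t < (pvOps cs).length → cs.getD (2 * t + 1) ' ' = (pvOps cs).getD t ' ' := by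
  induction cs using pvWFb.induct with
  | case1 => simp [pvOps]
  | case2 c => simp [pvOps]
  | case3 c o rest ih =>
    simp only [pvWFb, Bool.and_eq_true] at h
    intro t ht
    cases t with
    | zero => simp [pvOps]
    | succ t' =>
      have h2 : 2 * (t' + 1) + 1 = 2 * t' + 1 + 1 + 1 := by ring
      rw [h2]
      simp only [List.getD_cons_succ, pvOps]
      exact ih h.2 t' (by simpa [pvOps] using ht)

theorem pv_range2_cons (a b : Int) (h : a < b) :
    PySem.List.pyRange a b 2 = a :: PySem.List.pyRange (a + 2) b 2 := by
  rw [PySem.List.pyRange_of_pos a b (by omega), PySem.List.pyRange_of_pos (a + 2) b (by omega)]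
  have hcnt : ((b - a + 2 - 1) / 2).toNat = ((b - (a + 2) + 2 - 1) / 2).toNat + 1 := by omega
  by_cases h2 : a + 2 < b
  · rw [if_pos h, if_pos h2, hcnt, List.range_succ_eq_map, List.map_cons, List.map_map,
      List.cons_eq_cons]
    refine ⟨by simp, ?_⟩
    apply List.map_congr_left; intro k _; simp [Function.comp]; push_cast; ring
  · have h0 : ((b - (a + 2) + 2 - 1) / 2).toNat = 0 := by omega
    rw [if_pos h, if_neg h2, hcnt, h0]
    simp
theorem pv_range2_shift (a b : Int) :
    PySem.List.pyRange (a + 2) b 2 = (PySem.List.pyRange a (b - 2) 2).map (· + 2) := by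
  rw [PySem.List.pyRange_of_pos (a + 2) b (by omega), PySem.List.pyRange_of_pos a (b - 2) (by omega)]
  by_cases hc : a < b - 2
  · rw [if_pos (by omega), if_pos hc,
      show ((b - (a + 2) + 2 - 1) / 2).toNat = ((b - 2 - a + 2 - 1) / 2).toNat by omega,
      List.map_map]
    apply List.map_congr_left; intro k _; simp [Function.comp]; ring
  · rw [if_neg (by omega), if_neg hc]; simp
theorem pv_numsB (cs : List Char) :
    (PySem.List.pyRange 0 (cs.length : Int) 2).map (fun i => pvDigitVal (PySem.List.pyGetD cs i ' '))
      = pvNums cs := by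
  induction cs using pvNums.induct with
  | case1 => simp [PySem.List.pyRange_of_pos 0 0 (by omega : (0:Int) < 2), pvNums]
  | case2 c =>
    rw [show ((([c] : List Char).length : Int) = 1) by simp,
      show PySem.List.pyRange 0 1 2 = [0] from by decide]
    simp [pvNums, PySem.List.pyGetD_zero_cons]
  | case3 c o rest ih =>
    have hlen : (((c :: o :: rest).length : Int)) = (rest.length : Int) + 2 := by
      simp; push_cast; ring
    rw [hlen, pv_range2_cons 0 ((rest.length : Int) + 2) (by omega), pv_range2_shift,
      show ((rest.length : Int) + 2 - 2) = (rest.length : Int) by ring]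
    rw [List.map_cons, List.map_map]
    simp only [pvNums, List.cons_eq_cons]
    refine ⟨by simp [PySem.List.pyGetD_zero_cons], ?_⟩
    rw [← ih]
    apply List.map_congr_left
    intro i hi
    have hmem := (PySem.List.mem_pyRange_iff_of_pos (by omega : (0:Int) < 2) i).mp hi
    have h0 : 0 ≤ i := hmem.1
    simp only [Function.comp]
    rw [PySem.List.pyGetD_of_nonneg _ _ (by omega), PySem.List.pyGetD_of_nonneg _ _ h0]
    rw [show (i + 2).toNat = i.toNat + 1 + 1 by omega]
    simp [List.getD_cons_succ]
theorem pv_opsB (cs : List Char) :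
    (PySem.List.pyRange 1 (cs.length : Int) 2).map (fun i => PySem.List.pyGetD cs i ' ')
      = pvOps cs := by
  induction cs using pvNums.induct with
  | case1 => simp [PySem.List.pyRange_of_pos 1 0 (by omega : (0:Int) < 2), pvOps]
  | case2 c =>
    rw [show ((([c] : List Char).length : Int) = 1) by simp,
      show PySem.List.pyRange 1 1 2 = [] from by decide]
    simp [pvOps]
  | case3 c o rest ih =>
    have hlen : (((c :: o :: rest).length : Int)) = (rest.length : Int) + 2 := by
      simp; push_cast; ring
    rw [hlen, pv_range2_cons 1 ((rest.length : Int) + 2) (by omega), pv_range2_shift,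
      show ((rest.length : Int) + 2 - 2) = (rest.length : Int) by ring]
    rw [List.map_cons, List.map_map]
    simp only [pvOps, List.cons_eq_cons]
    refine ⟨?_, ?_⟩
    · rw [PySem.List.pyGetD_of_nonneg _ _ (by omega)]
      simp
    · rw [← ih]
      apply List.map_congr_left
      intro i hi
      have hmem := (PySem.List.mem_pyRange_iff_of_pos (by omega : (0:Int) < 2) i).mp hi
      have h0 : 0 ≤ i := by omega
      simp only [Function.comp]
      rw [PySem.List.pyGetD_of_nonneg _ _ (by omega), PySem.List.pyGetD_of_nonneg _ _ h0]
      rw [show (i + 2).toNat = i.toNat + 1 + 1 by omega]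
      simp [List.getD_cons_succ]
theorem pv_computeA_irrel (cs : List Char) :
    ∀ (f1 : Nat) (lo hi : Int) (f2 : Nat), (hi - lo).toNat < f1 → (hi - lo).toNat < f2 →
      pvComputeA cs f1 lo hi = pvComputeA cs f2 lo hi := by
  intro f1
  induction f1 with
  | zero => intro lo hi f2 h1 _; omega
  | succ g ih =>
    intro lo hi f2 h1 h2
    cases f2 with
    | zero => omega
    | succ g2 =>
      simp only [pvComputeA]
      by_cases heq : lo = hi
      · simp [heq]
      · rw [if_neg heq, if_neg heq]
        apply PySem.List.foldl_congr_mem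
        intro acc k hk
        have hmem := (PySem.List.mem_pyRange_iff_of_pos (by omega : (0:Int) < 2) k).mp hk
        have hlo : lo + 1 ≤ k := hmem.1
        have hhi : k < hi := hmem.2.1
        rw [ih lo (k - 1) g2 (by omega) (by omega), ih (k + 1) hi g2 (by omega) (by omega)]

theorem pv_range_odd (i j : Int) :
    PySem.List.pyRange (2 * i + 1) (2 * j) 2 = (PySem.List.pyRange i j 1).map (fun k => 2 * k + 1) := by
  rw [PySem.List.pyRange_of_pos (2 * i + 1) (2 * j) (by omega),
      PySem.List.pyRange_of_pos i j (by omega)]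
  by_cases hij : i < j
  · rw [if_pos (by omega), if_pos hij]
    have hcnt : ((2 * j - (2 * i + 1) + 2 - 1) / 2).toNat = ((j - i + 1 - 1) / 1).toNat := by omega
    rw [hcnt, List.map_map]
    apply List.map_congr_left; intro k _; simp [Function.comp]; ring
  · rw [if_neg (by omega), if_neg hij]
    simp


theorem pv_combine (cs : List Char) (h : pvWFb cs = true) (mN : Nat) (hm : (pvNums cs).length = mN)
    (d : PySem.Dict (Int × Int) (List Int)) (i j : Int)
    (hi : 0 ≤ i) (hij : i < j) (hj : j < (mN : Int))
    (hd : ∀ i' j' : Int, 0 ≤ i' → i' ≤ j' → j' < (mN : Int) → j' - i' < j - i →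
      PySem.Dict.getD d (i', j') [] = pvComputeA cs cs.length (2 * i') (2 * j')) :
    pvCombine d (pvOps cs) i j = pvComputeA cs cs.length (2 * i) (2 * j) := by
  have hmge : 2 ≤ mN := by omega
  obtain ⟨hlen, hol⟩ := pv_len_eq cs h
  rw [hm] at hlen hol
  obtain ⟨F', hF⟩ : ∃ F', cs.length = F' + 1 := ⟨cs.length - 1, by omega⟩
  conv_rhs => rw [hF]
  simp only [pvComputeA]
  rw [if_neg (by omega : ¬ (2 * i = 2 * j))]
  rw [pv_range_odd i j, List.foldl_map]
  unfold pvCombine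
  apply PySem.List.foldl_congr_mem
  intro acc k hk
  have hmm := PySem.List.mem_pyRange_one.mp hk
  have hop : PySem.List.pyGetD cs (2 * k + 1) ' ' = PySem.List.pyGetD (pvOps cs) k ' ' := by
    rw [show (2 * k + 1 : Int) = ((2 * k.toNat + 1 : Nat) : Int) by omega,
      PySem.List.pyGetD_natCast, PySem.List.pyGetD_of_nonneg _ _ (by omega)]
    exact pv_opsIdx cs h k.toNat (by omega)
  have hL : pvComputeA cs F' (2 * i) (2 * k + 1 - 1) = PySem.Dict.getD d (i, k) [] := by
    rw [show (2 * k + 1 - 1 : Int) = 2 * k by ring,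
      pv_computeA_irrel cs F' (2 * i) (2 * k) cs.length (by omega) (by omega)]
    exact (hd i k hi (by omega) (by omega) (by omega)).symm
  have hR : pvComputeA cs F' (2 * k + 1 + 1) (2 * j) = PySem.Dict.getD d (k + 1, j) [] := by
    rw [show (2 * k + 1 + 1 : Int) = 2 * (k + 1) by ring,
      pv_computeA_irrel cs F' (2 * (k + 1)) (2 * j) cs.length (by omega) (by omega)]
    exact (hd (k + 1) j (by omega) (by omega) hj (by omega)).symm
  simp only [hop, hL, hR]
theorem pv_inner_fold (cs : List Char) (h : pvWFb cs = true) (mN : Nat) (hm : (pvNums cs).length = mN)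
    (t : Int) (h1 : 1 ≤ t) (ht : t ≤ (mN : Int) - 1) :
    ∀ (aN : Nat) (a : Int) (d : PySem.Dict (Int × Int) (List Int)),
    a = ((mN : Int) - t) - (aN : Int) → 0 ≤ a →
    (∀ i j : Int, 0 ≤ i → i ≤ j → j < (mN : Int) → (j - i < t ∨ (j - i = t ∧ i < a)) →
      PySem.Dict.getD d (i, j) [] = pvComputeA cs cs.length (2 * i) (2 * j)) →
    ∀ i j : Int, 0 ≤ i → i ≤ j → j < (mN : Int) → j - i ≤ t →
      PySem.Dict.getD
        ((PySem.List.pyRange a ((mN : Int) - t) 1).foldl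
          (fun d i => d.insert (i, i + t) (pvCombine d (pvOps cs) i (i + t))) d) (i, j) []
        = pvComputeA cs cs.length (2 * i) (2 * j) := by
  intro aN
  induction aN with
  | zero =>
    intro a d ha h0 hd i j hi hij hj hspan
    rw [PySem.List.pyRange_one_eq_nil (by omega)]
    simp only [List.foldl_nil]
    by_cases hlt : j - i < t
    · exact hd i j hi hij hj (Or.inl hlt)
    · exact hd i j hi hij hj (Or.inr ⟨by omega, by omega⟩)
  | succ aN' ih =>
    intro a d ha h0 hd i j hi hij hj hspan
    rw [PySem.List.pyRange_one_cons (by push_cast at ha; omega)]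
    simp only [List.foldl_cons]
    apply ih (a + 1) _ (by push_cast at ha ⊢; omega) (by omega) ?_ i j hi hij hj hspan
    intro i' j' hi' hij' hj' hcase
    rw [PySem.Dict.getD_insert]
    by_cases hkey : ((i', j') : Int × Int) = (a, a + t)
    · rw [if_pos hkey]
      obtain ⟨h1a, h2a⟩ : i' = a ∧ j' = a + t := by
        simpa [Prod.ext_iff] using hkey
      rw [h1a, h2a]
      exact pv_combine cs h mN hm d a (a + t) h0 (by omega) (by push_cast at ha; omega)
        (fun i'' j'' h1'' h2'' h3'' h4'' => hd i'' j'' h1'' h2'' h3'' (Or.inl (by omega)))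
    · rw [if_neg hkey]
      apply hd i' j' hi' hij' hj'
      rcases hcase with hlt | ⟨heq, hlt⟩
      · exact Or.inl hlt
      · by_cases hia : i' = a
        · exfalso
          apply hkey
          subst hia
          have : j' = i' + t := by omega
          simp [this]
        · exact Or.inr ⟨heq, by omega⟩
theorem pv_dp0_fold (nums : List Int) (mN : Nat) (hm : nums.length = mN) :
    ∀ i : Int, 0 ≤ i → i < (mN : Int) →
      PySem.Dict.getD
        ((PySem.List.pyRange 0 (mN : Int) 1).foldl
          (fun d i => d.insert (i, i) [PySem.List.pyGetD nums i 0]) PySem.Dict.empty) (i, i) []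
        = [nums.getD i.toNat 0] := by
  suffices aux : ∀ (bN : Nat) (a : Int) (d : PySem.Dict (Int × Int) (List Int)),
      a = (mN : Int) - (bN : Int) → 0 ≤ a →
      (∀ i : Int, 0 ≤ i → i < a → PySem.Dict.getD d (i, i) [] = [nums.getD i.toNat 0]) →
      ∀ i : Int, 0 ≤ i → i < (mN : Int) →
        PySem.Dict.getD
          ((PySem.List.pyRange a (mN : Int) 1).foldl
            (fun d i => d.insert (i, i) [PySem.List.pyGetD nums i 0]) d) (i, i) []
          = [nums.getD i.toNat 0] by
    intro i hi him
    exact aux mN 0 PySem.Dict.empty (by push_cast; ring) (by omega)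
      (by intro i' h1 h2; omega) i hi him
  intro bN
  induction bN with
  | zero =>
    intro a d ha h0 hd i hi him
    rw [PySem.List.pyRange_one_eq_nil (by omega)]
    simp only [List.foldl_nil]
    exact hd i hi (by omega)
  | succ bN' ih =>
    intro a d ha h0 hd i hi him
    rw [PySem.List.pyRange_one_cons (by push_cast at ha; omega)]
    simp only [List.foldl_cons]
    apply ih (a + 1) _ (by push_cast at ha ⊢; omega) (by omega) ?_ i hi him
    intro i' h1 h2
    rw [PySem.Dict.getD_insert]
    by_cases hia : i' = a
    · subst hia
      rw [if_pos rfl, PySem.List.pyGetD_of_nonneg _ _ h1]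
    · rw [if_neg (by simp [Prod.ext_iff, hia])]
      exact hd i' h1 (by omega)
theorem pv_outer_fold (cs : List Char) (h : pvWFb cs = true) (mN : Nat) (hm : (pvNums cs).length = mN) :
    ∀ (bN : Nat) (t : Int) (d : PySem.Dict (Int × Int) (List Int)),
    t = (mN : Int) - (bN : Int) → 1 ≤ t →
    (∀ i j : Int, 0 ≤ i → i ≤ j → j < (mN : Int) → j - i < t →
      PySem.Dict.getD d (i, j) [] = pvComputeA cs cs.length (2 * i) (2 * j)) →
    ∀ i j : Int, 0 ≤ i → i ≤ j → j < (mN : Int) →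
      PySem.Dict.getD
        ((PySem.List.pyRange t (mN : Int) 1).foldl (fun d span =>
          (PySem.List.pyRange 0 ((mN : Int) - span) 1).foldl
            (fun d i => d.insert (i, i + span) (pvCombine d (pvOps cs) i (i + span))) d) d) (i, j) []
        = pvComputeA cs cs.length (2 * i) (2 * j) := by
  intro bN
  induction bN with
  | zero =>
    intro t d ht h1 hd i j hi hij hj
    rw [PySem.List.pyRange_one_eq_nil (by omega)]
    simp only [List.foldl_nil]
    exact hd i j hi hij hj (by omega)
  | succ bN' ih =>
    intro t d ht h1 hd i j hi hij hj
    rw [PySem.List.pyRange_one_cons (by push_cast at ht; omega)]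
    simp only [List.foldl_cons]
    apply ih (t + 1) _ (by push_cast at ht ⊢; omega) (by omega) ?_ i j hi hij hj
    intro i' j' hi' hij' hj' hsp
    exact pv_inner_fold cs h mN hm t h1 (by push_cast at ht; omega)
      ((mN : Int) - t).toNat 0 d (by push_cast at ht ⊢; omega) (by omega)
      (by
        intro i'' j'' h1'' h2'' h3'' hcase
        rcases hcase with hlt | ⟨_, hlt⟩
        · exact hd i'' j'' h1'' h2'' h3'' hlt
        · omega)
      i' j' hi' hij' hj' (by omega)
set_option maxHeartbeats 1000000 in
theorem scoreOfStudents_spec : Claim_equal_scoreOfStudents := by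
  intro s answers _ hpre
  unfold Spec_scoreOfStudents
  rcases hpre with hnil | hpre'
  · -- the empty string: both sides score 5 per answer equal to 0
    simp only [scoreOfStudents, scoreOfStudents_alt, hnil, PySem.List.len_eq, List.length_nil,
      Nat.cast_zero, List.map_nil]
    simp [pvPass1, pvComputeA, PySem.Set.diff, PySem.Set.contains, PySem.Dict.getD,
      PySem.Dict.get?, PySem.Dict.empty,
      show PySem.List.pyRange 1 (0:Int) 2 = [] from by decide,
      show PySem.List.pyRange 0 (0:Int) 2 = [] from by decide]
  simp only [scoreOfStudents, scoreOfStudents_alt, PySem.List.len_eq]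
  set cs := s.toList with hcs
  have hpre'' : pvWFb cs = true := hpre'
  simp only [pv_numsB cs, pv_opsB cs]
  obtain ⟨hlen, hol⟩ := pv_len_eq cs hpre''
  have hne := pv_nums_ne_nil cs hpre''
  have hm1 : 1 ≤ (pvNums cs).length := List.length_pos_of_ne_nil hne
  have hmem : ∀ p ∈ (pvOps cs).zip (pvNums cs).tail, p.1 = '+' ∨ p.1 = '*' := by
    intro p hp
    exact pv_ops_mem cs hpre'' p.1 (List.of_mem_zip hp).1
  -- the true values agree
  obtain ⟨x0, tl, he⟩ := List.exists_cons_of_ne_nil hne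
  have hTrueB :
      (((('+' :: pvOps cs).zip (pvNums cs)).foldl
          (fun (p : Int × Int) ox => if ox.1 = '+' then (p.1 + p.2, ox.2) else (p.1, p.2 * ox.2))
          (0, 0)).1
        + ((('+' :: pvOps cs).zip (pvNums cs)).foldl
          (fun (p : Int × Int) ox => if ox.1 = '+' then (p.1 + p.2, ox.2) else (p.1, p.2 * ox.2))
          (0, 0)).2)
      = pvSP ((pvNums cs).headD 0) ((pvOps cs).zip (pvNums cs).tail) := by
    rw [he]
    simp only [List.zip_cons_cons, List.foldl_cons, List.tail_cons, List.headD_cons,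
      if_true, zero_add]
    rw [pv_bfold ((pvOps cs).zip tl) 0 x0]
    simp
  simp only [hTrueB]
  simp only [pv_toks_shape cs hpre'']
  simp only [show pvPass1 [] (PvTok.I ((pvNums cs).headD 0) :: pvFlat ((pvOps cs).zip (pvNums cs).tail))
        = pvPass1 [PvTok.I ((pvNums cs).headD 0)] (pvFlat ((pvOps cs).zip (pvNums cs).tail)) by
      simp [pvPass1]]
  simp only [pv_sumNP_foldl, pv_sumNP_reverse,
    pv_pass1_flat ((pvOps cs).zip (pvNums cs).tail) [] ((pvNums cs).headD 0) hmem]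
  simp only [pv_sumNP_nil, zero_add]
  -- the achievable value sets agree
  obtain ⟨F', hF⟩ : ∃ F', cs.length = F' + 1 := ⟨cs.length - 1, by omega⟩
  have hbase : ∀ i j : Int, 0 ≤ i → i ≤ j → j < ((pvNums cs).length : Int) → j - i < 1 →
      PySem.Dict.getD
        ((PySem.List.pyRange 0 ((pvNums cs).length : Int) 1).foldl
          (fun d i => d.insert (i, i) [PySem.List.pyGetD (pvNums cs) i 0]) PySem.Dict.empty) (i, j) []
        = pvComputeA cs cs.length (2 * i) (2 * j) := by
    intro i j hi hij hj hsp
    have hji : j = i := by omega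
    rw [hji]
    rw [pv_dp0_fold (pvNums cs) (pvNums cs).length rfl i hi (by omega)]
    conv_rhs => rw [hF]
    simp only [pvComputeA]
    rw [show (2 * i : Int) = ((2 * i.toNat : Nat) : Int) by omega, PySem.List.pyGetD_natCast,
      pv_numsIdx cs hpre'' i.toNat (by omega)]
    simp
  have hdp := pv_outer_fold cs hpre'' (pvNums cs).length rfl ((pvNums cs).length - 1) 1
    ((PySem.List.pyRange 0 ((pvNums cs).length : Int) 1).foldl
      (fun d i => d.insert (i, i) [PySem.List.pyGetD (pvNums cs) i 0]) PySem.Dict.empty)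
    (by push_cast; omega) (by omega) hbase 0 (((pvNums cs).length : Int) - 1)
    (by omega) (by omega) (by omega)
  have hdp' : PySem.Dict.getD
      ((PySem.List.pyRange 1 ((pvNums cs).length : Int) 1).foldl (fun d span =>
        (PySem.List.pyRange 0 (((pvNums cs).length : Int) - span) 1).foldl
          (fun d i => d.insert (i, i + span) (pvCombine d (pvOps cs) i (i + span))) d)
        ((PySem.List.pyRange 0 ((pvNums cs).length : Int) 1).foldl
          (fun d i => d.insert (i, i) [PySem.List.pyGetD (pvNums cs) i 0]) PySem.Dict.empty))
      (0, ((pvNums cs).length : Int) - 1) []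
      = pvComputeA cs cs.length 0 ((cs.length : Int) - 1) := by
    rw [hdp]
    rw [show (2 * (0 : Int)) = 0 by ring,
      show (2 * (((pvNums cs).length : Int) - 1)) = (cs.length : Int) - 1 by omega]
  simp only [hdp']
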